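-- pv_equiv track=rewrite | github.com/2ira/AnomalyGen-main | main/create_node_info.py | build_simple_call_graph
-- ===== SOURCE A (Python) =====
-- def build_simple_call_graph(call_graph_with_depth):
--     simple_call_graph = {}
--     for caller, callees in call_graph_with_depth.items():
--         unique_callees = []
--         seen = set()
--         for callee, _ in callees:
--             if callee not in seen:
--                 unique_callees.append(callee)
--                 seen.add(callee)
--         simple_call_graph[caller] = unique_callees
--     return simple_call_graph
-- ===== SOURCE B (Python) =====
-- def build_simple_call_graph(call_graph_with_depth):
--     def dedup(names):
--         # head-and-filter recursion: keep the head, delete every later copy of it,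
--         # recurse on the rest; first-occurrence order falls out structurally.
--         if not names:
--             return []
--         head = names[0]
--         return [head] + dedup([n for n in names[1:] if n != head])
--     return {caller: dedup([callee for callee, _ in callees])
--             for caller, callees in call_graph_with_depth.items()}
-- ===== Notes on version B (the rewrite author's own statement) =====
-- stated objective: alternative
-- what changed: Per-caller dedup no longer tracks a seen set: B recursively keeps the head of the callee list and filters all of its later duplicates out before recursing (head-and-filter recursion), wrapped in a dict comprehension.
import Mathlib
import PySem

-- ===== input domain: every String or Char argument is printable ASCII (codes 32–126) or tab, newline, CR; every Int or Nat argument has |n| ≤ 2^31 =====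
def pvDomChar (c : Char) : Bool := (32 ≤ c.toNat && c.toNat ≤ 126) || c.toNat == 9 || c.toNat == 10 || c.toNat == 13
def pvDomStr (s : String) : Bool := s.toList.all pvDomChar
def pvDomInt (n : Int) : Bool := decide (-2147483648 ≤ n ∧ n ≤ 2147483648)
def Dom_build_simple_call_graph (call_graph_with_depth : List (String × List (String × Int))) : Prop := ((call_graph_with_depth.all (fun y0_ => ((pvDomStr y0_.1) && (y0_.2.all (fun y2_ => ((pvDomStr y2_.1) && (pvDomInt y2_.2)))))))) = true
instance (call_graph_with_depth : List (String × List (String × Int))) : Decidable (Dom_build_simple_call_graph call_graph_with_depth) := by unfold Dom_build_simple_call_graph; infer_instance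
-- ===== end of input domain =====

-- B deduplicates each callee list by head-and-filter recursion (keep the head, filter its later
-- copies out, recurse) instead of A's seen-set scan; same results, a different mechanism.

-- ===== PORT A =====
def build_simple_call_graph (call_graph_with_depth : List (String × List (String × Int))) : List (String × List String) :=
  (call_graph_with_depth.foldl (fun simple_call_graph p =>
      let r := p.2.foldl (fun (st : List String × PySem.Set String) q =>
          if PySem.Set.contains st.2 q.1 then st
          else (st.1 ++ [q.1], PySem.Set.add st.2 q.1))
        ([], PySem.Set.empty)
      simple_call_graph.insert p.1 r.1)
    PySem.Dict.empty).items

-- ===== PORT B =====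
-- Source B's inner helper `dedup`: head, then recurse on the tail with the head filtered out.
def pvHeadFilterDedup : List String → List String
  | [] => []
  | head :: rest => head :: pvHeadFilterDedup (rest.filter (fun n => n ≠ head))
termination_by l => l.length
decreasing_by simpa using (List.length_filter_le _ _).trans (by simp)

def build_simple_call_graph_alt (call_graph_with_depth : List (String × List (String × Int))) : List (String × List String) :=
  (call_graph_with_depth.foldl (fun d p =>
      d.insert p.1 (pvHeadFilterDedup (p.2.map (·.1))))
    PySem.Dict.empty).items

-- ===== PRECONDITION & SPEC =====
def Spec_build_simple_call_graph (call_graph_with_depth : List (String × List (String × Int))) (out : List (String × List String)) : Prop := out = build_simple_call_graph_alt call_graph_with_depth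
instance (call_graph_with_depth : List (String × List (String × Int))) (out : List (String × List String)) : Decidable (Spec_build_simple_call_graph call_graph_with_depth out) := by unfold Spec_build_simple_call_graph; infer_instance

-- ===== CLAIM =====
def Claim_equal_build_simple_call_graph : Prop := ∀ (call_graph_with_depth : List (String × List (String × Int))), Dom_build_simple_call_graph call_graph_with_depth → Spec_build_simple_call_graph call_graph_with_depth (build_simple_call_graph call_graph_with_depth)

-- ===== LEMMAS AND PROOFS =====

theorem pv_hfd_nil : pvHeadFilterDedup [] = [] := by
  rw [pvHeadFilterDedup.eq_def]

theorem pv_hfd_cons (a : String) (t : List String) :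
    pvHeadFilterDedup (a :: t) = a :: pvHeadFilterDedup (t.filter (fun n => n ≠ a)) := by
  rw [pvHeadFilterDedup.eq_def]

-- A's inner loop keeps its list and its seen set equal; on the diagonal a step is Set.add.
theorem pv_inner_diag (l : List (String × Int)) (u : List String) :
    l.foldl (fun (st : List String × PySem.Set String) q =>
        if PySem.Set.contains st.2 q.1 then st
        else (st.1 ++ [q.1], PySem.Set.add st.2 q.1)) (u, u)
      = (let v := l.foldl (fun acc q => PySem.Set.add acc q.1) u; (v, v)) := by
  induction l generalizing u with
  | nil => simp
  | cons q t ih =>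
    simp only [List.foldl_cons]
    by_cases h : PySem.Set.contains u q.1 = true
    · have h' : q.1 ∈ u := by simpa using h
      rw [if_pos h, show PySem.Set.add u q.1 = u from by simp [PySem.Set.add, h']]
      exact ih u
    · have h' : q.1 ∉ u := by simpa using h
      rw [if_neg h, show PySem.Set.add u q.1 = u ++ [q.1] from by simp [PySem.Set.add, h']]
      exact ih (u ++ [q.1])

-- accumulating Set.add over l is: the accumulator, then head-and-filter dedup of what is new
theorem pv_foldl_add_eq (l : List String) (u : List String) :
    l.foldl PySem.Set.add u = u ++ pvHeadFilterDedup (l.filter (fun a => decide (a ∉ u))) := by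
  induction l generalizing u with
  | nil => simp [pv_hfd_nil]
  | cons a t ih =>
    simp only [List.foldl_cons]
    by_cases h : a ∈ u
    · rw [show PySem.Set.add u a = u from by simp [PySem.Set.add, h]]
      rw [ih u]
      simp [h]
    · rw [show PySem.Set.add u a = u ++ [a] from by simp [PySem.Set.add, h]]
      rw [ih (u ++ [a])]
      rw [List.filter_cons]
      simp only [h, not_false_iff, decide_true, if_pos]
      rw [pv_hfd_cons]
      have hf : t.filter (fun b => decide (b ∉ u ++ [a]))
          = (t.filter (fun b => decide (b ∉ u))).filter (fun b => decide (b ≠ a)) := by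
        rw [List.filter_filter]
        apply List.filter_congr
        intro b _
        simp [List.mem_append, not_or, and_comm]
      rw [hf]
      simp

theorem pv_inner_eq_hfd (l : List (String × Int)) :
    (l.foldl (fun (st : List String × PySem.Set String) q =>
        if PySem.Set.contains st.2 q.1 then st
        else (st.1 ++ [q.1], PySem.Set.add st.2 q.1)) ([], PySem.Set.empty)).1
      = pvHeadFilterDedup (l.map (·.1)) := by
  have h := pv_inner_diag l []
  rw [show (PySem.Set.empty : PySem.Set String) = ([] : List String) from rfl, h]
  show List.foldl (fun acc q => PySem.Set.add acc q.1) [] l = _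
  have hm : List.foldl (fun acc q => PySem.Set.add acc q.1) [] l
      = (l.map (·.1)).foldl PySem.Set.add [] := by
    rw [List.foldl_map]
  rw [hm, pv_foldl_add_eq]
  simp

-- ===== VERDICT =====
theorem build_simple_call_graph_spec : Claim_equal_build_simple_call_graph := by
  intro cg _
  unfold Spec_build_simple_call_graph build_simple_call_graph build_simple_call_graph_alt
  congr 2
  funext d p
  simp only [pv_inner_eq_hfd]
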